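-- pv_equiv track=rewrite | github.com/forcecraft/aion | fixtures/codingfix.py | fix_letters
-- ===== SOURCE A (Python) =====
-- def fix_letters(text):
--     fixes = {
--         '%s': 'ś',
--         '%z': 'ż',
--         '%o': 'ó',
--         '%l': 'ł',
--         '%e': 'ę',
--         '%a': 'ą',
--         '%x': 'ź',
--         '%c': 'ć',
--         '%n': 'ń',
--         '%S': 'Ś',
--         '%Z': 'Ż',
--         '%O': 'Ó',
--         '%L': 'Ł',
--         '%E': 'Ę',
--         '%A': 'Ą',
--         '%X': 'Ź',
--         '%C': 'Ć',
--         '%N': 'Ń',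
--     }
--     for old, new in fixes.items():
--         text = text.replace(old, new)
--     return text
-- ===== SOURCE B (Python) =====
-- def fix_letters(text):
--     fixes = {
--         '%s': 'ś',
--         '%z': 'ż',
--         '%o': 'ó',
--         '%l': 'ł',
--         '%e': 'ę',
--         '%a': 'ą',
--         '%x': 'ź',
--         '%c': 'ć',
--         '%n': 'ń',
--         '%S': 'Ś',
--         '%Z': 'Ż',
--         '%O': 'Ó',
--         '%L': 'Ł',
--         '%E': 'Ę',
--         '%A': 'Ą',
--         '%X': 'Ź',
--         '%C': 'Ć',
--         '%N': 'Ń',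
--     }
--     out = []
--     i = 0
--     n = len(text)
--     while i < n:
--         rep = fixes.get(text[i:i + 2])
--         if rep is not None:
--             out.append(rep)
--             i += 2
--         else:
--             out.append(text[i])
--             i += 1
--     return ''.join(out)
-- ===== Notes on version B (the rewrite author's own statement) =====
-- stated objective: alternative
-- what changed: Replaced 18 sequential full-string replace passes with a single left-to-right scan that looks each two-character window up in the mapping dict; correct because no replacement value contains a percent sign, so the passes never interact.
import Mathlib
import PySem

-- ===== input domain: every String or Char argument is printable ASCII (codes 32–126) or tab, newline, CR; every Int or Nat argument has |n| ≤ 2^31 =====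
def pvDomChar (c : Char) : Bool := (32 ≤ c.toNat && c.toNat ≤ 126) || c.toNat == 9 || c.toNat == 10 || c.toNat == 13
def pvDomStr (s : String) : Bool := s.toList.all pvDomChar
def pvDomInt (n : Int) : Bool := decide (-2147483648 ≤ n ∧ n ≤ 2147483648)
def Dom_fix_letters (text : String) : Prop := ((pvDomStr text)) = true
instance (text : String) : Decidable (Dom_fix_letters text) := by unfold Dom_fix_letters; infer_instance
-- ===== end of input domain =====

-- B replaces A's 18 sequential full-string .replace passes by ONE left-to-right scan of the
-- string that looks each two-character window up in the same mapping (objective: alternative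
-- single-pass algorithm; equivalent because no replacement value contains a percent sign).

-- ===== PORT A =====
def pvFixPairs : List (String × String) :=
  [("%s", "ś"), ("%z", "ż"), ("%o", "ó"), ("%l", "ł"), ("%e", "ę"), ("%a", "ą"),
   ("%x", "ź"), ("%c", "ć"), ("%n", "ń"), ("%S", "Ś"), ("%Z", "Ż"), ("%O", "Ó"),
   ("%L", "Ł"), ("%E", "Ę"), ("%A", "Ą"), ("%X", "Ź"), ("%C", "Ć"), ("%N", "Ń")]

def fix_letters (text : String) : String :=
  (PySem.Dict.ofList pvFixPairs).items.foldl
    (fun t p => PySem.Str.replace t p.1 p.2) text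

-- ===== PORT B =====
-- Source B's fixes dict, keys (two-character strings) as char lists
def pvFixList : List (List Char × Char) :=
  [(['%', 's'], 'ś'), (['%', 'z'], 'ż'), (['%', 'o'], 'ó'), (['%', 'l'], 'ł'),
   (['%', 'e'], 'ę'), (['%', 'a'], 'ą'), (['%', 'x'], 'ź'), (['%', 'c'], 'ć'),
   (['%', 'n'], 'ń'), (['%', 'S'], 'Ś'), (['%', 'Z'], 'Ż'), (['%', 'O'], 'Ó'),
   (['%', 'L'], 'Ł'), (['%', 'E'], 'Ę'), (['%', 'A'], 'Ą'), (['%', 'X'], 'Ź'),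
   (['%', 'C'], 'Ć'), (['%', 'N'], 'Ń')]

-- Source B's while loop: look the window text[i:i+2] up; on a hit emit the replacement and
-- advance by 2, otherwise emit text[i] and advance by 1.
def pvScan (m : List (List Char × Char)) : List Char → List Char
  | [] => []
  | c :: t =>
    match List.lookup (List.take 2 (c :: t)) m with
    | some p => p :: pvScan m (List.drop 1 t)
    | none   => c :: pvScan m t
termination_by l => l.length
decreasing_by all_goals (simp; try omega)

def fix_letters_alt (text : String) : String :=
  String.ofList (pvScan pvFixList text.toList)

-- ===== PRECONDITION & SPEC =====
def Spec_fix_letters (text : String) (out : String) : Prop := out = fix_letters_alt text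
instance (text : String) (out : String) : Decidable (Spec_fix_letters text out) := by unfold Spec_fix_letters; infer_instance

-- ===== CLAIM (what is proved, stated in full; the proofs are below) =====
def Claim_equal_fix_letters : Prop := ∀ (text : String), Dom_fix_letters text → Spec_fix_letters text (fix_letters text)

-- ===== LEMMAS AND PROOFS =====

-- Proof-side recursive characterisation of one .replace pass (no fuel, no accumulator).
def pvRep (old new : List Char) : List Char → List Char
  | [] => []
  | c :: t =>
    if old.isPrefixOf (c :: t) then new ++ pvRep old new (List.drop (old.length - 1) t)
    else c :: pvRep old new t
termination_by l => l.length
decreasing_by all_goals (simp; try omega)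

theorem pvGo_eq (old new : List Char) (h : old ≠ []) :
    ∀ fuel (l acc : List Char), l.length ≤ fuel →
      PySem.Chars.replace.go old new fuel l acc = acc.reverse ++ pvRep old new l := by
  intro fuel
  induction fuel with
  | zero =>
    intro l acc hl
    have hl0 : l = [] := List.eq_nil_of_length_eq_zero (Nat.le_zero.mp hl)
    subst hl0
    simp [PySem.Chars.replace.go, pvRep]
  | succ fuel ih =>
    intro l acc hl
    cases l with
    | nil => simp [PySem.Chars.replace.go, pvRep]
    | cons c t =>
      rw [PySem.Chars.replace.go]
      by_cases hpre : old.isPrefixOf (c :: t)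
      · rw [if_pos hpre]
        obtain ⟨o, os, rfl⟩ : ∃ o os, old = o :: os := by
          cases old with
          | nil => exact absurd rfl h
          | cons o os => exact ⟨o, os, rfl⟩
        have hdrop : List.drop (o :: os).length (c :: t) = List.drop ((o :: os).length - 1) t := by
          simp
        rw [hdrop, ih _ _ (by simp at hl ⊢; omega)]
        rw [pvRep, if_pos hpre]
        simp
      · rw [if_neg hpre, ih _ _ (by simp at hl; omega)]
        rw [pvRep, if_neg hpre]
        simp

theorem pvReplace_eq (old new s : List Char) (h : old ≠ []) :
    PySem.Chars.replace s old new = pvRep old new s := by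
  rw [PySem.Chars.replace]
  rw [if_neg (by simpa [List.isEmpty_iff] using h)]
  simpa using pvGo_eq old new h s.length s [] le_rfl

-- every entry of the (partial) map is '%'+ASCII-letter key with a non-ASCII value
def pvGood (m : List (List Char × Char)) : Prop :=
  ∀ p ∈ m, ∃ c : Char, p.1 = ['%', c] ∧ c ≠ '%' ∧ c.toNat < 128 ∧ 128 ≤ p.2.toNat

theorem pvLookup_mem {m : List (List Char × Char)} {k : List Char} {v : Char}
    (h : List.lookup k m = some v) : (k, v) ∈ m := by
  induction m with
  | nil => simp [List.lookup] at h
  | cons p rest ih =>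
    rw [List.lookup] at h
    by_cases hk : k == p.1
    · simp [hk] at h
      have : (k, v) = p := by
        rw [Prod.ext_iff]
        exact ⟨eq_of_beq hk, h.symm⟩
      rw [this]
      exact List.mem_cons_self
    · simp [hk] at h
      exact List.mem_cons_of_mem _ (ih h)

theorem pvLookup_not_mem {m : List (List Char × Char)} {k : List Char}
    (h : k ∉ m.map Prod.fst) : List.lookup k m = none := by
  induction m with
  | nil => rfl
  | cons p rest ih =>
    simp at h
    rw [List.lookup]
    have : (k == p.1) = false := by
      cases p
      exact beq_false_of_ne h.1
    rw [this]
    exact ih (by simpa using h.2)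

theorem pvLookup_none_head {m : List (List Char × Char)} (hm : pvGood m)
    {c : Char} (hc : c ≠ '%') (t : List Char) :
    List.lookup (List.take 2 (c :: t)) m = none := by
  cases heq : List.lookup (List.take 2 (c :: t)) m with
  | none => rfl
  | some v =>
    obtain ⟨c', hk, hc', -, -⟩ := hm _ (pvLookup_mem heq)
    simp at hk
    exact absurd hk.1.symm (Ne.symm hc)

theorem pvScan_nil (l : List Char) : pvScan [] l = l := by
  induction l with
  | nil => rw [pvScan]
  | cons c t ih => rw [pvScan]; simp [List.lookup]; exact ih

theorem pvScan_congr (m1 m2 : List (List Char × Char))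
    (h : ∀ k, List.lookup k m1 = List.lookup k m2) :
    ∀ l, pvScan m1 l = pvScan m2 l := by
  intro l
  induction l using pvScan.induct m1 with
  | case1 => rw [pvScan, pvScan]
  | case2 c t p hp ih => rw [pvScan, hp, pvScan, ← h, hp, ih]
  | case3 c t hp ih => rw [pvScan, hp, pvScan, ← h, hp, ih]

theorem pvLookup_cons_ne {k k0 : List Char} (v : Char) (m : List (List Char × Char))
    (h : k ≠ k0) : List.lookup k ((k0, v) :: m) = List.lookup k m := by
  simp [List.lookup, beq_false_of_ne h]

theorem pvLookup_cons_self (k0 : List Char) (v : Char) (m : List (List Char × Char)) :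
    List.lookup k0 ((k0, v) :: m) = some v := by
  simp [List.lookup]

-- key step: one .replace pass applied to the scan under map m is the scan under the grown map
theorem pvStep (m : List (List Char × Char)) (hm : pvGood m) (c₀ p₀ : Char)
    (hc : c₀ ≠ '%') (hca : c₀.toNat < 128) (hp : 128 ≤ p₀.toNat)
    (hnew : List.lookup ['%', c₀] m = none) :
    ∀ l : List Char, pvRep ['%', c₀] [p₀] (pvScan m l) = pvScan ((['%', c₀], p₀) :: m) l := by
  have hm' : pvGood ((['%', c₀], p₀) :: m) := by
    intro p hp
    rcases List.mem_cons.mp hp with rfl | hpm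
    · exact ⟨c₀, rfl, hc, hca, ‹128 ≤ p₀.toNat›⟩
    · exact hm _ hpm
  intro l
  induction l using pvScan.induct m with
  | case1 => rw [pvScan, pvScan, pvRep]
  | case2 c t p hp ih =>
    -- the window is a key of m, so it is not ['%', c₀] (whose lookup in m is none)
    have hkne : List.take 2 (c :: t) ≠ ['%', c₀] := fun he => by rw [he, hnew] at hp; cases hp
    obtain ⟨c', hk, -, -, hv⟩ := hm _ (pvLookup_mem hp)
    simp only at hk hv
    have hpne : p ≠ '%' := fun he => by rw [he] at hv; simp at hv
    rw [pvScan, hp]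
    rw [pvRep, if_neg (by simp [List.isPrefixOf]; intro he; exact absurd he.symm hpne)]
    rw [ih, pvScan, pvLookup_cons_ne _ _ hkne, hp]
  | case3 c t hp ih =>
    by_cases hcp : c = '%'
    · subst hcp
      cases t with
      | nil =>
        have hnil : pvScan m ([] : List Char) = [] := by rw [pvScan]
        have hnil' : pvScan ((['%', c₀], p₀) :: m) ([] : List Char) = [] := by rw [pvScan]
        have h1 : List.take 2 ['%'] ≠ ['%', c₀] := by simp
        rw [pvScan, hp, hnil, pvScan, pvLookup_cons_ne _ _ h1, hp, hnil']
        rw [pvRep, if_neg (by simp [List.isPrefixOf]), pvRep]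
      | cons d t' =>
        by_cases hd : d = c₀
        · subst hd
          -- the scan under m copies "%"+d unchanged and the new pattern fires exactly here
          have hin : List.lookup (List.take 2 (d :: t')) m = none := pvLookup_none_head hm hc t'
          have hin' : List.lookup (List.take 2 (d :: t')) ((['%', d], p₀) :: m) = none :=
            pvLookup_none_head hm' hc t'
          have hself : List.take 2 ('%' :: d :: t') = ['%', d] := by simp [List.take]
          have hR : pvScan ((['%', d], p₀) :: m) ('%' :: d :: t')
              = p₀ :: pvScan ((['%', d], p₀) :: m) t' := by
            rw [pvScan, hself, pvLookup_cons_self]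
            simp
          have hscan_t : pvScan m (d :: t') = d :: pvScan m t' := by rw [pvScan, hin]
          have hscan_t' : pvScan ((['%', d], p₀) :: m) (d :: t')
              = d :: pvScan ((['%', d], p₀) :: m) t' := by rw [pvScan, hin']
          have ih' : pvRep ['%', d] [p₀] (pvScan m t') = pvScan ((['%', d], p₀) :: m) t' := by
            rw [hscan_t, hscan_t'] at ih
            rw [pvRep, if_neg (by simp [List.isPrefixOf]; intro he; exact absurd he.symm hc)] at ih
            exact (List.cons.injEq _ _ _ _ ▸ ih :
              d = d ∧ pvRep ['%', d] [p₀] (pvScan m t') = pvScan ((['%', d], p₀) :: m) t').2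
          have hLs : pvScan m ('%' :: d :: t') = '%' :: d :: pvScan m t' := by
            rw [pvScan, hp, hscan_t]
          rw [hLs, hR, pvRep, if_pos (by simp [List.isPrefixOf])]
          simp only [List.length_cons, List.length_nil, List.drop]
          simp [ih']
        · -- the window matches neither m (given) nor the new key
          have hkne : List.take 2 ('%' :: d :: t') ≠ ['%', c₀] := by simp [List.take, hd]
          have hR : pvScan ((['%', c₀], p₀) :: m) ('%' :: d :: t')
              = '%' :: pvScan ((['%', c₀], p₀) :: m) (d :: t') := by
            rw [pvScan, pvLookup_cons_ne _ _ hkne, hp]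
          have hhead : ∃ h rest, pvScan m (d :: t') = h :: rest ∧ h ≠ c₀ := by
            rw [pvScan]
            cases hq : List.lookup (List.take 2 (d :: t')) m with
            | some q =>
              obtain ⟨c', -, -, -, hv⟩ := hm _ (pvLookup_mem hq)
              simp only at hv
              exact ⟨q, _, rfl, fun he => by rw [he] at hv; omega⟩
            | none => exact ⟨d, _, rfl, hd⟩
          obtain ⟨hh, rest, hsc, hhne⟩ := hhead
          rw [pvScan, hp, pvRep,
            if_neg (by rw [hsc]; simp [List.isPrefixOf]; intro he; exact absurd he.symm hhne),
            ih, hR]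
    · -- ordinary character: copied by both scans, untouched by the pass
      have hkne : List.take 2 (c :: t) ≠ ['%', c₀] := by cases t <;> simp [List.take, hcp]
      rw [pvScan, hp, pvRep,
        if_neg (by simp [List.isPrefixOf]; intro he; exact absurd he.symm hcp),
        ih, pvScan, pvLookup_cons_ne _ _ hkne, hp]

def pvAcc (ps : List (Char × Char)) (m : List (List Char × Char)) : List (List Char × Char) :=
  ps.foldl (fun m cp => (['%', cp.1], cp.2) :: m) m

theorem pvFold (ps : List (Char × Char)) :
    ∀ m, pvGood m →
      (∀ cp ∈ ps, cp.1 ≠ '%' ∧ cp.1.toNat < 128 ∧ 128 ≤ cp.2.toNat) →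
      (∀ cp ∈ ps, List.lookup ['%', cp.1] m = none) →
      (ps.map Prod.fst).Nodup →
      ∀ l, ps.foldl (fun s cp => pvRep ['%', cp.1] [cp.2] s) (pvScan m l)
            = pvScan (pvAcc ps m) l := by
  induction ps with
  | nil => intro m _ _ _ _ l; simp [pvAcc]
  | cons cp ps' ih =>
    intro m hm hprops hnone hnodup l
    have hcp := hprops cp List.mem_cons_self
    have hnodup' := hnodup
    simp only [List.map_cons, List.nodup_cons] at hnodup'
    rw [List.foldl_cons,
      pvStep m hm cp.1 cp.2 hcp.1 hcp.2.1 hcp.2.2 (hnone cp List.mem_cons_self)]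
    have hm' : pvGood ((['%', cp.1], cp.2) :: m) := by
      intro p hp
      rcases List.mem_cons.mp hp with rfl | hpm
      · exact ⟨cp.1, rfl, hcp.1, hcp.2.1, hcp.2.2⟩
      · exact hm _ hpm
    have hnone' : ∀ cp' ∈ ps', List.lookup ['%', cp'.1] ((['%', cp.1], cp.2) :: m) = none := by
      intro cp' h'
      have hne : (['%', cp'.1] : List Char) ≠ ['%', cp.1] := by
        simp
        intro he
        exact hnodup'.1 (he ▸ List.mem_map_of_mem h')
      rw [pvLookup_cons_ne _ _ hne]
      exact hnone cp' (List.mem_cons_of_mem _ h')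
    have := ih ((['%', cp.1], cp.2) :: m) hm' (fun c hc => hprops c (List.mem_cons_of_mem _ hc))
      hnone' hnodup'.2 l
    rw [this]
    rfl

theorem pvFoldStr (ps : List (String × String)) :
    ∀ s : String,
      (ps.foldl (fun t p => PySem.Str.replace t p.1 p.2) s).toList
        = ps.foldl (fun l p => PySem.Chars.replace l p.1.toList p.2.toList) s.toList := by
  induction ps with
  | nil => intro s; simp
  | cons p ps' ih =>
    intro s
    rw [List.foldl_cons, List.foldl_cons, ih, PySem.Str.toList_replace]

def pvPairs : List (Char × Char) :=
  [('s', 'ś'), ('z', 'ż'), ('o', 'ó'), ('l', 'ł'), ('e', 'ę'), ('a', 'ą'),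
   ('x', 'ź'), ('c', 'ć'), ('n', 'ń'), ('S', 'Ś'), ('Z', 'Ż'), ('O', 'Ó'),
   ('L', 'Ł'), ('E', 'Ę'), ('A', 'Ą'), ('X', 'Ź'), ('C', 'Ć'), ('N', 'Ń')]

theorem pvLookup_acc_eq (k : List Char) :
    List.lookup k (pvAcc pvPairs []) = List.lookup k pvFixList := by
  by_cases hk : k ∈ pvFixList.map Prod.fst
  · simp only [pvFixList, List.map_cons, List.map_nil, List.mem_cons, List.not_mem_nil,
      or_false] at hk
    rcases hk with rfl | rfl | rfl | rfl | rfl | rfl | rfl | rfl | rfl | rfl | rfl | rfl | rfl | rfl | rfl | rfl | rfl | rfl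
    all_goals rfl
  · rw [pvLookup_not_mem hk, pvLookup_not_mem]
    intro hmem
    apply hk
    simp only [pvAcc, pvPairs, pvFixList] at hmem ⊢
    simp only [List.foldl_cons, List.foldl_nil] at hmem
    simp at hmem ⊢
    tauto

-- ===== VERDICT (by name: the statement is the Claim_ definition above) =====
theorem fix_letters_spec : Claim_equal_fix_letters := by
  intro text _
  unfold Spec_fix_letters fix_letters fix_letters_alt
  have h1 : (PySem.Dict.ofList pvFixPairs).items = pvFixPairs := rfl
  rw [h1]
  have h2 : (pvFixPairs.foldl (fun t p => PySem.Str.replace t p.1 p.2) text).toList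
      = pvScan pvFixList text.toList := by
    rw [pvFoldStr]
    rw [PySem.List.foldl_congr_mem pvFixPairs _
      (fun l p => pvRep p.1.toList p.2.toList l) text.toList
      (fun acc p hp => pvReplace_eq _ _ acc (by fin_cases hp <;> decide))]
    have h3 : pvFixPairs.foldl (fun l p => pvRep p.1.toList p.2.toList l) text.toList
        = pvPairs.foldl (fun l cp => pvRep ['%', cp.1] [cp.2] l) text.toList := rfl
    rw [h3]
    have h4 := pvFold pvPairs [] (fun p hp => absurd hp (List.not_mem_nil))
      (by decide) (fun cp _ => rfl) (by decide) text.toList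
    rw [pvScan_nil] at h4
    rw [h4, pvScan_congr _ _ pvLookup_acc_eq]
  have := congrArg String.ofList h2
  rwa [String.ofList_toList] at this
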